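-- pv_equiv track=rewrite | github.com/vutienduong/hkt-aero-eyes | scripts/visualize_annotations.py | create_frame_bbox_map
-- ===== SOURCE A (Python) =====
-- def create_frame_bbox_map(intervals):
--     """Create a mapping from frame number to bboxes."""
--     frame_map = {}
--
--     for interval in intervals:
--         for bbox in interval["bboxes"]:
--             frame_num = bbox["frame"]
--             if frame_num not in frame_map:
--                 frame_map[frame_num] = []
--             frame_map[frame_num].append(bbox)
--
--     return frame_map
-- ===== SOURCE B (Python) =====
-- def create_frame_bbox_map(intervals):
--     """Create a mapping from frame number to bboxes."""
--     flat = [bbox for interval in intervals for bbox in interval["bboxes"]]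
--     frames = list(dict.fromkeys(bbox["frame"] for bbox in flat))
--     return {f: [bbox for bbox in flat if bbox["frame"] == f] for f in frames}
-- ===== Notes on version B (the rewrite author's own statement) =====
-- stated objective: alternative
-- what changed: Replaces the append-into-dict-of-lists pass with flatten all bboxes once, dedup the frame keys in first-occurrence order, then build each group by filtering the flat list per frame.
import Mathlib
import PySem

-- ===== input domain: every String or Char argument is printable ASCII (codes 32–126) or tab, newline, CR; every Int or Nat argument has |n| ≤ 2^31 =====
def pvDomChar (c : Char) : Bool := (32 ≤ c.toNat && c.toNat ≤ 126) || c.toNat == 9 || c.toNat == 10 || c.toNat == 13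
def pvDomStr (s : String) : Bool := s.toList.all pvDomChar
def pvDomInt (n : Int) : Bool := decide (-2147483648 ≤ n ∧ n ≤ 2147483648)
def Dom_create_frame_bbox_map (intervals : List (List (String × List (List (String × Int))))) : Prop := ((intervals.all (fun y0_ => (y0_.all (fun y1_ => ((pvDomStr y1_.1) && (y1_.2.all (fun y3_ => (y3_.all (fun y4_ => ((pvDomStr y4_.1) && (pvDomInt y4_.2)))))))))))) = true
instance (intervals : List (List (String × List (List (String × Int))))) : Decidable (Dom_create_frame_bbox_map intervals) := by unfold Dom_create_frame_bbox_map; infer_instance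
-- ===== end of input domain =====

-- B replaces A's single append-into-dict-of-lists pass by flatten + ordered key dedup + one filter per
-- distinct frame (alternative decomposition, not faster); equivalence is about the return value only.

-- shared helper: Python dict lookup d[k] on an association list (first match; none = KeyError)
def pyLookup {α : Type} (d : List (String × α)) (k : String) : Option α :=
  (d.find? (fun p => p.1 == k)).map (·.2)

-- ===== PORT A =====
def create_frame_bbox_map (intervals : List (List (String × List (List (String × Int))))) : List (Int × List (List (String × Int))) :=
  (intervals.foldl (fun frame_map interval =>
      ((pyLookup interval "bboxes").getD []).foldl (fun frame_map bbox =>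
        let frame_num := (pyLookup bbox "frame").getD 0
        let frame_map := if frame_map.contains frame_num then frame_map
                         else frame_map.insert frame_num []
        frame_map.modify frame_num [] (· ++ [bbox]))
      frame_map)
    PySem.Dict.empty).items

-- ===== PORT B =====
def create_frame_bbox_map_alt (intervals : List (List (String × List (List (String × Int))))) : List (Int × List (List (String × Int))) :=
  let flat := intervals.flatMap (fun interval => (pyLookup interval "bboxes").getD [])
  let frames := PySem.List.dedup (flat.map (fun bbox => (pyLookup bbox "frame").getD 0))
  frames.map (fun f => (f, flat.filter (fun bbox => ((pyLookup bbox "frame").getD 0) == f)))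

-- ===== PRECONDITION & SPEC =====
-- Pre_ excludes exactly the inputs where Python A raises KeyError: an interval without a
-- "bboxes" key, or a bbox (in a first-match "bboxes" list) without a "frame" key.
def Pre_create_frame_bbox_map (intervals : List (List (String × List (List (String × Int))))) : Prop :=
  ∀ interval ∈ intervals, (pyLookup interval "bboxes").isSome = true ∧
    ∀ bbox ∈ (pyLookup interval "bboxes").getD [], (pyLookup bbox "frame").isSome = true
instance (intervals : List (List (String × List (List (String × Int))))) : Decidable (Pre_create_frame_bbox_map intervals) := by unfold Pre_create_frame_bbox_map; infer_instance

def pvWitness_create_frame_bbox_map : (List (List (String × List (List (String × Int))))) :=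
  [[("bboxes", [[("frame", 1), ("x", 3)], [("frame", 0), ("x", 4)], [("frame", 1), ("x", 5)]])],
   [("bboxes", [[("frame", 0), ("x", 6)]])]]

def Spec_create_frame_bbox_map (intervals : List (List (String × List (List (String × Int))))) (out : List (Int × List (List (String × Int)))) : Prop := out = create_frame_bbox_map_alt intervals
instance (intervals : List (List (String × List (List (String × Int))))) (out : List (Int × List (List (String × Int)))) : Decidable (Spec_create_frame_bbox_map intervals out) := by unfold Spec_create_frame_bbox_map; infer_instance

-- ===== CLAIM (what is proved, stated in full; the proofs are below) =====
def Claim_equal_create_frame_bbox_map : Prop := ∀ (intervals : List (List (String × List (List (String × Int))))), Dom_create_frame_bbox_map intervals → Pre_create_frame_bbox_map intervals → Spec_create_frame_bbox_map intervals (create_frame_bbox_map intervals)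

-- ===== LEMMAS AND PROOFS =====

-- abbreviation used only in the proofs
def frameOf (bbox : List (String × Int)) : Int := (pyLookup bbox "frame").getD 0

-- A's guarded step (ensure the key exists, then append) is a plain modify-append
theorem step_eq_modify (d : PySem.Dict Int (List (List (String × Int)))) (k : Int)
    (b : List (String × Int)) :
    (if d.contains k then d else d.insert k []).modify k [] (· ++ [b])
      = d.modify k [] (· ++ [b]) := by
  by_cases h : d.contains k = true
  · simp [h]
  · have hk : d.contains k = false := by simpa using h
    rw [if_neg h]
    unfold PySem.Dict.modify
    rw [PySem.Dict.getD_insert_self, PySem.Dict.getD_of_not_contains d [] hk]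
    apply PySem.Dict.ext
    rw [PySem.Dict.items_insert_of_contains _ _ (PySem.Dict.contains_insert_self d k []),
        PySem.Dict.items_insert_of_not_contains _ _ hk,
        PySem.Dict.items_insert_of_not_contains _ _ hk, List.map_append]
    have hnone : ∀ p ∈ d.items, (p.1 == k) = false := by
      unfold PySem.Dict.contains at hk
      intro p hp
      simpa using List.any_eq_false.mp hk p hp
    apply congrArg₂ (· ++ ·)
    · conv_rhs => rw [← List.map_id d.items]
      apply List.map_congr_left
      intro p hp
      simp [hnone p hp]
    · simp

theorem getD_foldl_modify_append_key (l : List (List (String × Int)))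
    (d : PySem.Dict Int (List (List (String × Int)))) (c : Int) :
    (l.foldl (fun d b => d.modify (frameOf b) [] (· ++ [b])) d).getD c []
      = d.getD c [] ++ l.filter (fun b => frameOf b == c) := by
  induction l generalizing d with
  | nil => simp
  | cons b t ih =>
    simp only [List.foldl_cons, ih, List.filter_cons]
    by_cases h : frameOf b = c
    · subst h
      simp [PySem.Dict.getD_modify_self]
    · have hb : (frameOf b == c) = false := by simpa using h
      rw [PySem.Dict.getD_modify_of_ne d [] _ (Ne.symm h), hb]
      simp

-- the items of a dict with Nodup keys are its keys paired with their getD values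
theorem items_eq_keys_map {ν : Type} (d : PySem.Dict Int ν) (d0 : ν) (h : d.keys.Nodup) :
    d.items = d.keys.map (fun k => (k, d.getD k d0)) := by
  have hk : d.keys = d.items.map (·.1) := rfl
  rw [hk, List.map_map]
  conv_lhs => rw [← List.map_id d.items]
  apply List.map_congr_left
  intro p hp
  have hg := PySem.Dict.getD_of_mem_items d (k := p.1) (v := p.2) (by simpa using hp) h d0
  simp [Function.comp, hg]

theorem create_frame_bbox_map_eq (intervals : List (List (String × List (List (String × Int))))) :
    create_frame_bbox_map intervals = create_frame_bbox_map_alt intervals := by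
  unfold create_frame_bbox_map create_frame_bbox_map_alt
  have hflat :
      (intervals.foldl (fun frame_map interval =>
        ((pyLookup interval "bboxes").getD []).foldl (fun frame_map bbox =>
          let frame_num := (pyLookup bbox "frame").getD 0
          let frame_map := if frame_map.contains frame_num then frame_map
                           else frame_map.insert frame_num []
          frame_map.modify frame_num [] (· ++ [bbox]))
        frame_map)
      PySem.Dict.empty)
      = ((intervals.flatMap (fun interval => (pyLookup interval "bboxes").getD [])).foldl
          (fun fm bbox => fm.modify (frameOf bbox) [] (· ++ [bbox])) PySem.Dict.empty) := by
    generalize (PySem.Dict.empty : PySem.Dict Int (List (List (String × Int)))) = d0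
    induction intervals generalizing d0 with
    | nil => simp
    | cons iv t ih =>
      simp only [List.foldl_cons, List.flatMap_cons, List.foldl_append, ih]
      congr 1
      apply PySem.List.foldl_congr_mem
      intro acc b _
      exact step_eq_modify acc (frameOf b) b
  rw [hflat]
  set flat := intervals.flatMap (fun interval => (pyLookup interval "bboxes").getD []) with hflatdef
  set d := flat.foldl (fun fm bbox => fm.modify (frameOf bbox) [] (· ++ [bbox])) PySem.Dict.empty with hd
  have hkeys : d.keys = PySem.List.dedup (flat.map frameOf) := by
    rw [hd, PySem.Dict.keys_foldl_modify_key flat frameOf [] (fun _ b => (· ++ [b])) PySem.Dict.empty]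
    rw [PySem.Dict.keys_empty, PySem.List.dedup_eq_ofList]
    exact PySem.Set.update_nil_left _
  have hnodup : d.keys.Nodup := by
    rw [hkeys]; exact PySem.List.nodup_dedup _
  have hgetD : ∀ c, d.getD c [] = flat.filter (fun b => frameOf b == c) := by
    intro c
    rw [hd, getD_foldl_modify_append_key, PySem.Dict.getD_empty]
    simp
  rw [items_eq_keys_map d [] hnodup, hkeys]
  simp only [frameOf] at *
  apply List.map_congr_left
  intro f _
  rw [hgetD f]

-- ===== VERDICT (by name: the statement is the Claim_ definition above) =====
theorem create_frame_bbox_map_spec : Claim_equal_create_frame_bbox_map := by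
  intro intervals _ _
  unfold Spec_create_frame_bbox_map
  exact create_frame_bbox_map_eq intervals
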